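-- pv_equiv track=rewrite | github.com/eliottcassidy2000/math | 04-computation/cycle_multiplicity.py | count_ham_cycles
-- ===== SOURCE A (Python) =====
-- def count_ham_cycles(A, n):
--     """Count directed Hamiltonian cycles in tournament A.
--     Fix vertex 0 as start, count cycles 0→...→0."""
--     if n < 3: return 0
--     full_mask = (1 << n) - 1
--     dp = {}
--     dp[(1 << 0, 0)] = 1  # start at vertex 0
--
--     for ms in range(2, n+1):
--         for mask in range(1 << n):
--             if bin(mask).count('1') != ms: continue
--             if not (mask & 1): continue  # must include vertex 0
--             for v in range(n):
--                 if not (mask & (1 << v)): continue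
--                 if v == 0 and ms < n: continue  # don't revisit 0 early
--                 pm = mask ^ (1 << v)
--                 if not (pm & 1): continue  # previous mask must include 0
--                 t = 0
--                 for u in range(n):
--                     if (pm & (1 << u)) and A[u][v]:
--                         t += dp.get((pm, u), 0)
--                 if t:
--                     dp[(mask, v)] = t
--
--     # Count cycles: need edge from last vertex back to 0
--     total = 0
--     for v in range(1, n):
--         if A[v][0] and (full_mask, v) in dp:
--             total += dp[(full_mask, v)]
--     return total
-- ===== SOURCE B (Python) =====
-- def count_ham_cycles(A, n):
--     """Count directed Hamiltonian cycles in tournament A by inclusion-exclusion: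
--     signed closed-walk counts of length n from vertex 0 over each allowed vertex set."""
--     if n < 3:
--         return 0
--     total = 0
--     for sub in range(1 << (n - 1)):
--         excl = sub << 1  # excluded vertices (never vertex 0)
--         vec = [1 if v == 0 else 0 for v in range(n)]
--         for _ in range(n):
--             vec = [0 if (excl >> v) & 1 else
--                    sum(vec[u] for u in range(n)
--                        if u != v and not (excl >> u) & 1 and A[u][v])
--                    for v in range(n)]
--         total += (-1) ** bin(sub).count('1') * vec[0]
--     return total
-- ===== Notes on version B (the rewrite author's own statement) =====
-- stated objective: alternative
-- what changed: Replaces the Held-Karp bitmask DP over (visited-set, endpoint) states with inclusion-exclusion: for each subset of excluded nonzero vertices, count length-n closed walks at vertex 0 by n matrix-vector steps over the restricted adjacency, and accumulate with sign (-1)^|subset|; no per-endpoint path table is ever built.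
import Mathlib
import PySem

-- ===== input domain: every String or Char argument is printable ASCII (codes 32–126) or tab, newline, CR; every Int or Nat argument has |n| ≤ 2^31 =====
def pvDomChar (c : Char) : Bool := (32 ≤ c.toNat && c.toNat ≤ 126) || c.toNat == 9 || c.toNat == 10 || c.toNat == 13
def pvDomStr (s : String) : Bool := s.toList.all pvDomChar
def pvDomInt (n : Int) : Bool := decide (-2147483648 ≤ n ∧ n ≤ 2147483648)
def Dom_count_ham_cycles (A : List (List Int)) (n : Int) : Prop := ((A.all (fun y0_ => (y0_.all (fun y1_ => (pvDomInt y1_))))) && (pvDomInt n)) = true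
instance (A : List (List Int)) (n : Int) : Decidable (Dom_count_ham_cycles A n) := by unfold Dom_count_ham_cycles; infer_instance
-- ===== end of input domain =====

-- B replaces A's Held-Karp (visited-set, endpoint) dict DP by inclusion-exclusion over excluded
-- nonzero-vertex subsets: signed counts of length-n closed walks at vertex 0, each computed by n
-- matrix-vector steps over the restricted adjacency; same return value wherever the Python A returns.

-- ===== PORT A =====
-- A[u][v]: totalized indexing; Pre_count_ham_cycles guarantees every index Python actually
-- evaluates is in range, and out-of-range reads only occur under a false bit-test conjunct.
def pvIdx (A : List (List Int)) (u v : Nat) : Int := (A.getD u []).getD v 0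

-- port of bin(mask).count('1') for mask ≥ 0: number of set bits
def popcount (m : Nat) : Nat :=
  if m = 0 then 0 else m % 2 + popcount (m / 2)
decreasing_by exact Nat.div_lt_self (Nat.pos_of_ne_zero (by assumption)) (by norm_num)

-- literal port of A; `x & (1 << i)` as a truth test is `Nat.testBit x i`, `x ^ (1 << v)` is `x ^^^ (1 <<< v)`
def count_ham_cycles (A : List (List Int)) (n : Int) : Int :=
  if n < 3 then 0 else
    let nn := n.toNat
    let full_mask := 2 ^ nn - 1
    let dp0 : PySem.Dict (Nat × Nat) Int := (PySem.Dict.empty).insert (1, 0) 1  -- dp[(1 << 0, 0)] = 1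
    let dp := (List.range' 2 (nn - 1)).foldl (fun dp ms =>            -- for ms in range(2, n+1)
      (List.range (2 ^ nn)).foldl (fun dp mask =>                     -- for mask in range(1 << n)
        if popcount mask ≠ ms then dp
        else if ¬ mask.testBit 0 then dp
        else (List.range nn).foldl (fun dp v =>                       -- for v in range(n)
          if ¬ mask.testBit v then dp
          else if v = 0 ∧ ms < nn then dp
          else
            let pm := mask ^^^ (1 <<< v)
            if ¬ pm.testBit 0 then dp
            else
              let t : Int := (List.range nn).foldl (fun t u =>      -- for u in range(n)
                if pm.testBit u ∧ pvIdx A u v ≠ 0 then t + dp.getD (pm, u) 0 else t) 0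
              if t ≠ 0 then dp.insert (mask, v) t else dp) dp) dp) dp0
    (List.range' 1 (nn - 1)).foldl (fun total v =>                    -- for v in range(1, n)
      if pvIdx A v 0 ≠ 0 then
        match dp.get? (full_mask, v) with
        | some t => total + t
        | none => total
      else total) 0

-- ===== PORT B =====
-- one step of B's walk-count vector iteration (the inner list comprehension of Source B)
def bStep (A : List (List Int)) (nn excl : Nat) (vec : List Int) : List Int :=
  (List.range nn).map (fun v =>
    if excl.testBit v then 0
    else (List.range nn).foldl (fun s u =>
      if u ≠ v ∧ ¬ excl.testBit u ∧ pvIdx A u v ≠ 0 then s + vec.getD u 0 else s) 0)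

-- literal port of Source B: inclusion-exclusion over excluded subsets, n walk-propagation steps each
def count_ham_cycles_alt (A : List (List Int)) (n : Int) : Int :=
  if n < 3 then 0 else
    let nn := n.toNat
    (List.range (2 ^ (nn - 1))).foldl (fun total sub =>               -- for sub in range(1 << (n-1))
      let excl := sub <<< 1
      let vec := (List.range nn).foldl (fun vec _ => bStep A nn excl vec)   -- for _ in range(n)
        ((List.range nn).map (fun v => if v = 0 then 1 else 0))
      total + (-1 : Int) ^ (popcount sub) * vec.getD 0 0) 0

-- ===== PRECONDITION & SPEC =====
-- Exactly the inputs where the Python A returns (no IndexError): for n ≥ 3 it reads A[u][v] for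
-- every pair u ≠ v with u,v < n except column n-1 of row n-1 (the diagonal and in-DP column 0 are
-- skipped), so rows 0..n-2 need length ≥ n and row n-1 needs length ≥ n-1.
def Pre_count_ham_cycles (A : List (List Int)) (n : Int) : Prop :=
  n < 3 ∨ (n.toNat ≤ A.length ∧ ∀ i < n.toNat,
    (if i + 1 = n.toNat then n.toNat - 1 else n.toNat) ≤ (A.getD i []).length)
instance (A : List (List Int)) (n : Int) : Decidable (Pre_count_ham_cycles A n) := by
  unfold Pre_count_ham_cycles; infer_instance

def pvWitness_count_ham_cycles : List (List Int) × Int := ([[0, 1, 0], [0, 0, 1], [1, 0, 0]], 3)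

def Spec_count_ham_cycles (A : List (List Int)) (n : Int) (out : Int) : Prop := out = count_ham_cycles_alt A n
instance (A : List (List Int)) (n : Int) (out : Int) : Decidable (Spec_count_ham_cycles A n out) := by unfold Spec_count_ham_cycles; infer_instance

-- ===== CLAIM (what is proved, stated in full; the proofs are below) =====
def Claim_equal_count_ham_cycles : Prop := ∀ (A : List (List Int)) (n : Int), Dom_count_ham_cycles A n → Pre_count_ham_cycles A n → Spec_count_ham_cycles A n (count_ham_cycles A n)

-- ===== LEMMAS AND PROOFS =====

-- ham-path counts: hp A nn mask v = number of simple paths 0 → v with vertex set `mask`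
def hp (A : List (List Int)) (nn : Nat) (mask v : Nat) : Int :=
  if v = 0 then (if mask = 1 then 1 else 0)
  else if h : mask.testBit v then
    (List.range nn).foldl (fun t u =>
      if (mask ^^^ (1 <<< v)).testBit u ∧ pvIdx A u v ≠ 0 then
        t + hp A nn (mask ^^^ (1 <<< v)) u else t) 0
  else 0
termination_by mask
decreasing_by
  refine Nat.lt_of_testBit v ?_ h ?_
  · simp [Nat.testBit_xor, Nat.shiftLeft_eq, Nat.testBit_two_pow_self, h]
  · intro j hj
    simp [Nat.testBit_xor, Nat.shiftLeft_eq, Nat.testBit_two_pow_of_ne (Nat.ne_of_lt hj)]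

theorem testBit_xor_pow_self (m v : Nat) : (m ^^^ (1 <<< v)).testBit v = !m.testBit v := by
  simp [Nat.testBit_xor, Nat.shiftLeft_eq, Nat.testBit_two_pow_self]

theorem testBit_xor_pow_ne (m v u : Nat) (h : u ≠ v) :
    (m ^^^ (1 <<< v)).testBit u = m.testBit u := by
  simp [Nat.testBit_xor, Nat.shiftLeft_eq, Nat.testBit_two_pow_of_ne (Ne.symm h)]

theorem xor_pow_lt {m v : Nat} (h : m.testBit v = true) : m ^^^ (1 <<< v) < m := by
  refine Nat.lt_of_testBit v ?_ h ?_
  · simp [testBit_xor_pow_self, h]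
  · intro j hj; exact testBit_xor_pow_ne m v j (Nat.ne_of_lt hj).symm

theorem popcount_zero : popcount 0 = 0 := by
  rw [popcount]; simp

theorem popcount_rec (m : Nat) : popcount m = m % 2 + popcount (m / 2) := by
  by_cases h : m = 0
  · subst h; simp [popcount_zero]
  · conv_lhs => rw [popcount]
    rw [if_neg h]

theorem popcount_one : popcount 1 = 1 := by
  rw [popcount_rec]; simp [popcount_zero]

theorem popcount_eq_zero : ∀ {m : Nat}, popcount m = 0 → m = 0 := by
  intro m
  induction m using Nat.strong_induction_on with
  | _ m ih =>
    intro h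
    by_cases hm : m = 0
    · exact hm
    · rw [popcount_rec] at h
      have h2 : popcount (m / 2) = 0 := by omega
      have := ih (m / 2) (Nat.div_lt_self (Nat.pos_of_ne_zero hm) (by norm_num)) h2
      omega

theorem xor_div_two (a b : Nat) : (a ^^^ b) / 2 = (a / 2) ^^^ (b / 2) := by
  apply Nat.eq_of_testBit_eq
  intro i
  simp [Nat.testBit_div_two, Nat.testBit_xor]

theorem mod_two_eq_testBit (m : Nat) : m % 2 = if m.testBit 0 then 1 else 0 := by
  rw [Nat.testBit_zero]
  rcases Nat.mod_two_eq_zero_or_one m with h | h <;> simp [h]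

theorem xor_mod_two (a b : Nat) : (a ^^^ b) % 2 = (a % 2 + b % 2) % 2 := by
  have ha := mod_two_eq_testBit a
  have hb := mod_two_eq_testBit b
  have hx := mod_two_eq_testBit (a ^^^ b)
  rw [Nat.testBit_xor] at hx
  rw [hx, ha, hb]
  cases h1 : a.testBit 0 <;> cases h2 : b.testBit 0 <;> simp

theorem popcount_xor_pow : ∀ (v : Nat) {m : Nat}, m.testBit v = true →
    popcount (m ^^^ (1 <<< v)) + 1 = popcount m := by
  intro v
  induction v with
  | zero =>
    intro m h
    have hm2 : m % 2 = 1 := by simpa [Nat.testBit_zero] using h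
    have h1 : (1 <<< 0 : Nat) = 1 := rfl
    have hx2 : (m ^^^ (1 <<< 0)) % 2 = 0 := by
      rw [xor_mod_two, h1, hm2]
    rw [popcount_rec (m ^^^ (1 <<< 0)), popcount_rec m, xor_div_two, hx2, hm2, h1]
    have h0 : (1 : Nat) / 2 = 0 := rfl
    rw [h0, Nat.xor_zero]
    omega
  | succ v ih =>
    intro m h
    have hdiv : (1 <<< (v + 1)) / 2 = 1 <<< v := by
      simp [Nat.shiftLeft_eq, pow_succ]
    have hmod : (1 <<< (v + 1)) % 2 = 0 := by
      rw [Nat.shiftLeft_eq, one_mul, pow_succ]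
      omega
    have hx2 : (m ^^^ (1 <<< (v + 1))) % 2 = m % 2 := by
      rw [xor_mod_two, hmod]
      omega
    have hb : (m / 2).testBit v = true := by
      rw [Nat.testBit_div_two]
      exact h
    have := ih hb
    rw [popcount_rec (m ^^^ (1 <<< (v + 1))), popcount_rec m, xor_div_two, hdiv, hx2]
    omega

theorem popcount_two_pow_sub_one (n : Nat) : popcount (2 ^ n - 1) = n := by
  induction n with
  | zero => simp [popcount_zero]
  | succ n ih =>
    have hp : (2 : Nat) ^ (n + 1) = 2 ^ n * 2 := pow_succ 2 n
    have hpos : (1 : Nat) ≤ 2 ^ n := Nat.one_le_two_pow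
    rw [popcount_rec]
    have h1 : (2 ^ (n + 1) - 1) % 2 = 1 := by omega
    have h2 : (2 ^ (n + 1) - 1) / 2 = 2 ^ n - 1 := by omega
    rw [h1, h2, ih]
    omega

theorem eq_one_of_popcount_le_one {m : Nat} (h0 : m.testBit 0 = true) (h : popcount m ≤ 1) :
    m = 1 := by
  have hm2 : m % 2 = 1 := by simpa [Nat.testBit_zero] using h0
  rw [popcount_rec, hm2] at h
  have := popcount_eq_zero (m := m / 2) (by omega)
  omega

-- foldl over a list where every step keeps the accumulator
theorem foldl_keep {α : Type} (l : List α) (t : Int) (f : Int → α → Int)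
    (h : ∀ t a, a ∈ l → f t a = t) : l.foldl f t = t := by
  induction l generalizing t with
  | nil => rfl
  | cons a l ih => simp only [List.foldl_cons, h t a (by simp)]; exact ih t (fun t a ha => h t a (by simp [ha]))

theorem hp_zero_of_not_testBit {A : List (List Int)} {nn mask v : Nat}
    (h : mask.testBit v = false) : hp A nn mask v = 0 := by
  rw [hp]
  by_cases hv : v = 0
  · subst hv
    have : mask ≠ 1 := by rintro rfl; simp [Nat.testBit_zero] at h
    simp [this]
  · simp [hv, h]

theorem hp_zero_of_not_bit0 {A : List (List Int)} {nn : Nat} :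
    ∀ mask, mask.testBit 0 = false → ∀ v, hp A nn mask v = 0 := by
  intro mask
  induction mask using Nat.strong_induction_on with
  | _ mask ih =>
    intro h v
    by_cases hv : v = 0
    · subst hv; exact hp_zero_of_not_testBit h
    · rw [hp]
      rw [if_neg hv]
      by_cases hb : mask.testBit v
      · rw [dif_pos hb]
        apply foldl_keep
        intro t u _
        have hlt : mask ^^^ (1 <<< v) < mask := xor_pow_lt hb
        have hb0 : (mask ^^^ (1 <<< v)).testBit 0 = false := by
          rw [testBit_xor_pow_ne mask v 0 (Ne.symm hv)]; exact h
        rw [ih _ hlt hb0 u]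
        split <;> simp
      · rw [dif_neg hb]

theorem hp_zero_high {A : List (List Int)} {nn mask v : Nat} (hm : mask < 2 ^ nn)
    (hv : nn ≤ v) : hp A nn mask v = 0 := by
  apply hp_zero_of_not_testBit
  apply Nat.testBit_lt_two_pow
  calc mask < 2 ^ nn := hm
    _ ≤ 2 ^ v := Nat.pow_le_pow_right (by norm_num) hv

theorem hp_one_zero (A : List (List Int)) (nn : Nat) : hp A nn 1 0 = 1 := by
  rw [hp]; simp

theorem hp_eq_fold {A : List (List Int)} {nn mask v : Nat} (hv : v ≠ 0)
    (h : mask.testBit v = true) :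
    hp A nn mask v = (List.range nn).foldl (fun t u =>
      if (mask ^^^ (1 <<< v)).testBit u ∧ pvIdx A u v ≠ 0 then
        t + hp A nn (mask ^^^ (1 <<< v)) u else t) 0 := by
  rw [hp]
  rw [if_neg hv, dif_pos h]

-- ===== A-side invariant =====

def InvA (A : List (List Int)) (nn k : Nat) (dp : PySem.Dict (Nat × Nat) Int) : Prop :=
  ∀ mask v : Nat, mask < 2 ^ nn →
    dp.getD (mask, v) 0 = if popcount mask ≤ k then hp A nn mask v else 0

theorem invA_init (A : List (List Int)) (nn : Nat) :
    InvA A nn 1 ((PySem.Dict.empty).insert ((1 : Nat), (0 : Nat)) (1 : Int)) := by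
  intro mask v hm
  rw [PySem.Dict.getD_insert]
  by_cases hk : ((mask, v) : Nat × Nat) = ((1 : Nat), (0 : Nat))
  · rw [if_pos hk]
    obtain ⟨h1, h2⟩ := Prod.mk.injEq .. ▸ hk
    subst h1; subst h2
    rw [if_pos (by rw [popcount_one])]
    rw [hp_one_zero]
  · rw [if_neg hk, PySem.Dict.getD_empty]
    split
    · rename_i hpc
      interval_cases hc : popcount mask
      · have : mask = 0 := popcount_eq_zero hc
        subst this
        exact (hp_zero_of_not_testBit (Nat.zero_testBit v)).symm
      · by_cases hb : mask.testBit 0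
        · have h1 : mask = 1 := eq_one_of_popcount_le_one hb (by omega)
          subst h1
          have hv : v ≠ 0 := by rintro rfl; exact hk rfl
          refine (hp_zero_of_not_testBit ?_).symm
          simpa using Nat.testBit_two_pow_of_ne (n := 0) (m := v) (Ne.symm hv)
        · exact (hp_zero_of_not_bit0 mask (by simpa using hb) v).symm
    · rfl

-- the t-computing fold equals hp's fold when the dict already agrees with hp on (pm, ·)
theorem tfold_eq {A : List (List Int)} {nn : Nat} (pm v : Nat) (dp : PySem.Dict (Nat × Nat) Int)
    (hread : ∀ u, u < nn → dp.getD (pm, u) 0 = hp A nn pm u) :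
    (List.range nn).foldl (fun t u =>
        if pm.testBit u ∧ pvIdx A u v ≠ 0 then t + dp.getD (pm, u) 0 else t) 0 =
    (List.range nn).foldl (fun t u =>
        if pm.testBit u ∧ pvIdx A u v ≠ 0 then t + hp A nn pm u else t) 0 := by
  apply PySem.List.foldl_congr_mem
  intro t u hu
  rw [hread u (List.mem_range.mp hu)]

theorem hp_at_zero (A : List (List Int)) (nn m : Nat) :
    hp A nn m 0 = if m = 1 then 1 else 0 := by
  rw [hp]; simp

theorem vstepA {A : List (List Int)} {nn ms m : Nat} (hms2 : 2 ≤ ms) (hmsn : ms ≤ nn)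
    (hpc : popcount m = ms) (hb0 : m.testBit 0 = true) (hm2 : m < 2 ^ nn)
    (v₀ : Nat) (P : Nat → Bool) (dp : PySem.Dict (Nat × Nat) Int)
    (hlow : ∀ mask v : Nat, mask < 2 ^ nn → popcount mask < ms →
      dp.getD (mask, v) 0 = hp A nn mask v)
    (hm : ∀ v, dp.getD (m, v) 0 = if P v then hp A nn m v else 0) :
    (∀ v, ((if ¬ m.testBit v₀ then dp
      else if v₀ = 0 ∧ ms < nn then dp
      else if ¬ (m ^^^ (1 <<< v₀)).testBit 0 then dp
      else if ((List.range nn).foldl (fun t u =>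
            if (m ^^^ (1 <<< v₀)).testBit u ∧ pvIdx A u v₀ ≠ 0 then
              t + dp.getD (m ^^^ (1 <<< v₀), u) 0 else t) 0 : Int) ≠ 0 then
        dp.insert (m, v₀) ((List.range nn).foldl (fun t u =>
            if (m ^^^ (1 <<< v₀)).testBit u ∧ pvIdx A u v₀ ≠ 0 then
              t + dp.getD (m ^^^ (1 <<< v₀), u) 0 else t) 0)
      else dp)).getD (m, v) 0 = if (P v || decide (v = v₀)) then hp A nn m v else 0)
    ∧ (∀ mask v : Nat, mask ≠ m → ((if ¬ m.testBit v₀ then dp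
      else if v₀ = 0 ∧ ms < nn then dp
      else if ¬ (m ^^^ (1 <<< v₀)).testBit 0 then dp
      else if ((List.range nn).foldl (fun t u =>
            if (m ^^^ (1 <<< v₀)).testBit u ∧ pvIdx A u v₀ ≠ 0 then
              t + dp.getD (m ^^^ (1 <<< v₀), u) 0 else t) 0 : Int) ≠ 0 then
        dp.insert (m, v₀) ((List.range nn).foldl (fun t u =>
            if (m ^^^ (1 <<< v₀)).testBit u ∧ pvIdx A u v₀ ≠ 0 then
              t + dp.getD (m ^^^ (1 <<< v₀), u) 0 else t) 0)
      else dp)).getD (mask, v) 0 = dp.getD (mask, v) 0) := by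
  have hm1 : m ≠ 1 := by
    rintro rfl; rw [popcount_one] at hpc; omega
  have skip : (∀ v, dp.getD (m, v) 0 = if (P v || decide (v = v₀)) then hp A nn m v else 0) →
      ((∀ v, dp.getD (m, v) 0 = if (P v || decide (v = v₀)) then hp A nn m v else 0)
      ∧ (∀ mask v : Nat, mask ≠ m → dp.getD (mask, v) 0 = dp.getD (mask, v) 0)) :=
    fun h => ⟨h, fun _ _ _ => rfl⟩
  have skip0 : hp A nn m v₀ = 0 →
      ∀ v, dp.getD (m, v) 0 = if (P v || decide (v = v₀)) then hp A nn m v else 0 := by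
    intro h0 v
    by_cases hv : v = v₀
    · subst hv; rw [hm v, h0]; simp
    · rw [hm v]; have he : (P v || decide (v = v₀)) = P v := by simp [hv]
      rw [he]
  by_cases hb : m.testBit v₀ = true
  · rw [if_neg (by simp [hb])]
    by_cases h2 : v₀ = 0 ∧ ms < nn
    · rw [if_pos h2]
      refine skip (skip0 ?_)
      rw [h2.1, hp_at_zero, if_neg hm1]
    · rw [if_neg h2]
      by_cases hv0 : v₀ = 0
      · have hpm0 : (m ^^^ (1 <<< v₀)).testBit 0 = false := by
          subst hv0; rw [testBit_xor_pow_self, hb]; rfl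
        rw [if_pos (by simp [hpm0])]
        refine skip (skip0 ?_)
        rw [hv0, hp_at_zero, if_neg hm1]
      · have hpm0 : (m ^^^ (1 <<< v₀)).testBit 0 = true := by
          rw [testBit_xor_pow_ne m v₀ 0 (Ne.symm hv0)]; exact hb0
        rw [if_neg (by simp [hpm0])]
        have hread : ∀ u, u < nn →
            dp.getD (m ^^^ (1 <<< v₀), u) 0 = hp A nn (m ^^^ (1 <<< v₀)) u := by
          intro u hu
          refine hlow _ u (lt_trans (xor_pow_lt hb) hm2) ?_
          have := popcount_xor_pow v₀ hb
          omega
        have ht : ((List.range nn).foldl (fun t u =>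
            if (m ^^^ (1 <<< v₀)).testBit u ∧ pvIdx A u v₀ ≠ 0 then
              t + dp.getD (m ^^^ (1 <<< v₀), u) 0 else t) 0 : Int) = hp A nn m v₀ := by
          rw [tfold_eq _ v₀ dp hread, ← hp_eq_fold hv0 hb]
        rw [ht]
        by_cases hT : hp A nn m v₀ ≠ 0
        · rw [if_pos hT]
          refine ⟨fun v => ?_, fun mask v hne => ?_⟩
          · rw [PySem.Dict.getD_insert]
            by_cases hv : v = v₀
            · subst hv; rw [if_pos rfl]; simp
            · rw [if_neg (by simp [hv]), hm v]
              have he : (P v || decide (v = v₀)) = P v := by simp [hv]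
              rw [he]
          · rw [PySem.Dict.getD_insert, if_neg (by simp [hne])]
        · rw [if_neg hT]
          exact skip (skip0 (by simpa using hT))
  · rw [if_pos (by simp [hb])]
    exact skip (skip0 (hp_zero_of_not_testBit (by simpa using hb)))

theorem vfoldA_aux {A : List (List Int)} {nn ms m : Nat} (hms2 : 2 ≤ ms) (hmsn : ms ≤ nn)
    (hpc : popcount m = ms) (hb0 : m.testBit 0 = true) (hm2 : m < 2 ^ nn)
    (L : List Nat) (hL : ∀ v ∈ L, v < nn) (P : Nat → Bool)
    (dp : PySem.Dict (Nat × Nat) Int)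
    (hlow : ∀ mask v : Nat, mask < 2 ^ nn → popcount mask < ms →
      dp.getD (mask, v) 0 = hp A nn mask v)
    (hm : ∀ v, dp.getD (m, v) 0 = if P v then hp A nn m v else 0) :
    (∀ v, (L.foldl (fun dp v =>
          if ¬ m.testBit v then dp
          else if v = 0 ∧ ms < nn then dp
          else
            let pm := m ^^^ (1 <<< v)
            if ¬ pm.testBit 0 then dp
            else
              let t : Int := (List.range nn).foldl (fun t u =>
                if pm.testBit u ∧ pvIdx A u v ≠ 0 then t + dp.getD (pm, u) 0 else t) 0
              if t ≠ 0 then dp.insert (m, v) t else dp) dp).getD (m, v) 0 =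
        if P v ∨ v ∈ L then hp A nn m v else 0)
    ∧ (∀ mask v : Nat, mask ≠ m → (L.foldl (fun dp v =>
          if ¬ m.testBit v then dp
          else if v = 0 ∧ ms < nn then dp
          else
            let pm := m ^^^ (1 <<< v)
            if ¬ pm.testBit 0 then dp
            else
              let t : Int := (List.range nn).foldl (fun t u =>
                if pm.testBit u ∧ pvIdx A u v ≠ 0 then t + dp.getD (pm, u) 0 else t) 0
              if t ≠ 0 then dp.insert (m, v) t else dp) dp).getD (mask, v) 0 =
        dp.getD (mask, v) 0) := by
  induction L generalizing P dp with
  | nil =>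
    constructor
    · intro v
      simp only [List.foldl_nil]
      rw [hm v]; simp
    · intro mask v _
      simp only [List.foldl_nil]
  | cons v₀ L ih =>
    have hLrest : ∀ v ∈ L, v < nn := fun v hv => hL v (by simp [hv])
    obtain ⟨k1, k2⟩ := vstepA hms2 hmsn hpc hb0 hm2 v₀ P dp hlow hm
    simp only [List.foldl_cons]
    have hlow1 : ∀ mask v : Nat, mask < 2 ^ nn → popcount mask < ms →
        ((if ¬ m.testBit v₀ then dp
      else if v₀ = 0 ∧ ms < nn then dp
      else if ¬ (m ^^^ (1 <<< v₀)).testBit 0 then dp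
      else if ((List.range nn).foldl (fun t u =>
            if (m ^^^ (1 <<< v₀)).testBit u ∧ pvIdx A u v₀ ≠ 0 then
              t + dp.getD (m ^^^ (1 <<< v₀), u) 0 else t) 0 : Int) ≠ 0 then
        dp.insert (m, v₀) ((List.range nn).foldl (fun t u =>
            if (m ^^^ (1 <<< v₀)).testBit u ∧ pvIdx A u v₀ ≠ 0 then
              t + dp.getD (m ^^^ (1 <<< v₀), u) 0 else t) 0)
      else dp)).getD (mask, v) 0 = hp A nn mask v := by
      intro mask v h1 h2
      have hne : mask ≠ m := by rintro rfl; omega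
      rw [k2 mask v hne]; exact hlow mask v h1 h2
    obtain ⟨c1, c2⟩ := ih hLrest (fun v => P v || decide (v = v₀)) _ hlow1 k1
    refine ⟨fun v => ?_, fun mask v hne => ?_⟩
    · rw [c1 v]
      refine if_congr ?_ rfl rfl
      simp [List.mem_cons, or_assoc]
    · rw [c2 mask v hne, k2 mask v hne]

theorem mstepA {A : List (List Int)} {nn ms : Nat} (hms2 : 2 ≤ ms) (hmsn : ms ≤ nn)
    (m₀ : Nat) (hm₀ : m₀ < 2 ^ nn) (P : Nat → Bool) (hPm : P m₀ = false)
    (dp : PySem.Dict (Nat × Nat) Int)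
    (h : ∀ mask v : Nat, mask < 2 ^ nn → dp.getD (mask, v) 0 =
      if popcount mask < ms ∨ (popcount mask = ms ∧ P mask) then hp A nn mask v else 0) :
    ∀ mask v : Nat, mask < 2 ^ nn → ((if popcount m₀ ≠ ms then dp
      else if ¬ m₀.testBit 0 then dp
      else (List.range nn).foldl (fun dp v =>
          if ¬ m₀.testBit v then dp
          else if v = 0 ∧ ms < nn then dp
          else
            let pm := m₀ ^^^ (1 <<< v)
            if ¬ pm.testBit 0 then dp
            else
              let t : Int := (List.range nn).foldl (fun t u =>
                if pm.testBit u ∧ pvIdx A u v ≠ 0 then t + dp.getD (pm, u) 0 else t) 0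
              if t ≠ 0 then dp.insert (m₀, v) t else dp) dp)).getD (mask, v) 0 =
      if popcount mask < ms ∨ (popcount mask = ms ∧ (P mask || decide (mask = m₀))) then
        hp A nn mask v else 0 := by
  intro mask v hmask
  by_cases hpcm : popcount m₀ = ms
  · rw [if_neg (not_not_intro hpcm)]
    by_cases hb0 : m₀.testBit 0 = true
    · rw [if_neg (by simp [hb0])]
      have hlow' : ∀ mask v : Nat, mask < 2 ^ nn → popcount mask < ms →
          dp.getD (mask, v) 0 = hp A nn mask v := by
        intro mask v h1 h2
        rw [h mask v h1, if_pos (Or.inl h2)]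
      have hm' : ∀ v, dp.getD (m₀, v) 0 = if (fun _ => false) v then hp A nn m₀ v else 0 := by
        intro v
        rw [h m₀ v hm₀, if_neg (by simp [hPm]; omega)]
        simp
      obtain ⟨c1, c2⟩ := vfoldA_aux hms2 hmsn hpcm hb0 hm₀ (List.range nn)
        (fun v hv => List.mem_range.mp hv) (fun _ => false) dp hlow' hm'
      by_cases hmm : mask = m₀
      · subst hmm
        rw [c1 v]
        by_cases hv : v < nn
        · rw [if_pos (by simp [List.mem_range, hv])]
          rw [if_pos (Or.inr ⟨hpcm, by simp⟩)]
        · have h0 : hp A nn mask v = 0 := hp_zero_high hmask (by omega)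
          rw [h0]
          simp [List.mem_range, hv]
      · rw [c2 mask v hmm, h mask v hmask]
        refine if_congr ?_ rfl rfl
        simp [hmm]
    · rw [if_pos (by simp [hb0])]
      by_cases hmm : mask = m₀
      · subst hmm
        rw [h mask v hmask, if_neg (by simp [hPm]; omega)]
        rw [if_pos (Or.inr ⟨hpcm, by simp⟩)]
        rw [hp_zero_of_not_bit0 mask (by simpa using hb0) v]
      · rw [h mask v hmask]
        refine if_congr ?_ rfl rfl
        simp [hmm]
  · rw [if_pos hpcm]
    rw [h mask v hmask]
    refine if_congr ?_ rfl rfl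
    by_cases hmm : mask = m₀
    · subst hmm; simp [hpcm]
    · simp [hmm]

theorem maskfoldA_aux {A : List (List Int)} {nn ms : Nat} (hms2 : 2 ≤ ms) (hmsn : ms ≤ nn)
    (L : List Nat) (hL : ∀ m ∈ L, m < 2 ^ nn) (hnd : L.Nodup)
    (P : Nat → Bool) (hP : ∀ m ∈ L, P m = false)
    (dp : PySem.Dict (Nat × Nat) Int)
    (h : ∀ mask v : Nat, mask < 2 ^ nn → dp.getD (mask, v) 0 =
      if popcount mask < ms ∨ (popcount mask = ms ∧ P mask) then hp A nn mask v else 0) :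
    ∀ mask v : Nat, mask < 2 ^ nn →
      (L.foldl (fun dp mask =>
        if popcount mask ≠ ms then dp
        else if ¬ mask.testBit 0 then dp
        else (List.range nn).foldl (fun dp v =>
          if ¬ mask.testBit v then dp
          else if v = 0 ∧ ms < nn then dp
          else
            let pm := mask ^^^ (1 <<< v)
            if ¬ pm.testBit 0 then dp
            else
              let t : Int := (List.range nn).foldl (fun t u =>
                if pm.testBit u ∧ pvIdx A u v ≠ 0 then t + dp.getD (pm, u) 0 else t) 0
              if t ≠ 0 then dp.insert (mask, v) t else dp) dp) dp).getD (mask, v) 0 =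
      if popcount mask < ms ∨ (popcount mask = ms ∧ (P mask ∨ mask ∈ L)) then
        hp A nn mask v else 0 := by
  induction L generalizing P dp with
  | nil =>
    intro mask v hmask
    simp only [List.foldl_nil]
    rw [h mask v hmask]
    simp
  | cons m₀ L ih =>
    rw [List.nodup_cons] at hnd
    have hLrest : ∀ m ∈ L, m < 2 ^ nn := fun m hm => hL m (by simp [hm])
    have k := mstepA hms2 hmsn m₀ (hL m₀ (by simp)) P (hP m₀ (by simp)) dp h
    simp only [List.foldl_cons]
    have hP1 : ∀ m ∈ L, (P m || decide (m = m₀)) = false := by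
      intro m hm
      have h1 := hP m (by simp [hm])
      have h2 : m ≠ m₀ := by rintro rfl; exact hnd.1 hm
      simp [h1, h2]
    intro mask v hmask
    rw [ih hLrest hnd.2 (fun m => P m || decide (m = m₀)) hP1 _ k mask v hmask]
    refine if_congr (or_congr Iff.rfl (and_congr Iff.rfl ?_)) rfl rfl
    simp [List.mem_cons, or_assoc]

theorem stageA {A : List (List Int)} {nn ms : Nat} (hms2 : 2 ≤ ms) (hmsn : ms ≤ nn)
    (dp : PySem.Dict (Nat × Nat) Int) (h : InvA A nn (ms - 1) dp) :
    InvA A nn ms ((List.range (2 ^ nn)).foldl (fun dp mask =>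
        if popcount mask ≠ ms then dp
        else if ¬ mask.testBit 0 then dp
        else (List.range nn).foldl (fun dp v =>
          if ¬ mask.testBit v then dp
          else if v = 0 ∧ ms < nn then dp
          else
            let pm := mask ^^^ (1 <<< v)
            if ¬ pm.testBit 0 then dp
            else
              let t : Int := (List.range nn).foldl (fun t u =>
                if pm.testBit u ∧ pvIdx A u v ≠ 0 then t + dp.getD (pm, u) 0 else t) 0
              if t ≠ 0 then dp.insert (mask, v) t else dp) dp) dp) := by
  intro mask v hmask
  have k := maskfoldA_aux (A := A) hms2 hmsn (List.range (2 ^ nn))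
    (fun m hm => List.mem_range.mp hm) List.nodup_range (fun _ => false)
    (fun _ _ => rfl) dp ?h mask v hmask
  case h =>
    intro mask v hmask
    rw [h mask v hmask]
    refine if_congr ?_ rfl rfl
    simp
    omega
  rw [k]
  refine if_congr ?_ rfl rfl
  simp [List.mem_range, hmask]
  omega

theorem msfoldA {A : List (List Int)} {nn : Nat} :
    ∀ (cnt k : Nat) (dp : PySem.Dict (Nat × Nat) Int), 1 ≤ k → k + cnt ≤ nn → InvA A nn k dp →
    InvA A nn (k + cnt) ((List.range' (k + 1) cnt).foldl (fun dp ms =>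
      (List.range (2 ^ nn)).foldl (fun dp mask =>
        if popcount mask ≠ ms then dp
        else if ¬ mask.testBit 0 then dp
        else (List.range nn).foldl (fun dp v =>
          if ¬ mask.testBit v then dp
          else if v = 0 ∧ ms < nn then dp
          else
            let pm := mask ^^^ (1 <<< v)
            if ¬ pm.testBit 0 then dp
            else
              let t : Int := (List.range nn).foldl (fun t u =>
                if pm.testBit u ∧ pvIdx A u v ≠ 0 then t + dp.getD (pm, u) 0 else t) 0
              if t ≠ 0 then dp.insert (mask, v) t else dp) dp) dp) dp) := by
  intro cnt
  induction cnt with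
  | zero =>
    intro k dp h1 h2 h
    simpa using h
  | succ cnt ih =>
    intro k dp h1 h2 h
    rw [List.range'_succ]
    simp only [List.foldl_cons]
    have e : k + (cnt + 1) = (k + 1) + cnt := by omega
    rw [e]
    refine ih (k + 1) _ (by omega) (by omega) ?_
    have hst := stageA (A := A) (nn := nn) (ms := k + 1) (by omega) (by omega) dp ?_
    · exact hst
    · simpa using h

-- dict-membership pattern in A's final loop
theorem match_get?_eq (dp : PySem.Dict (Nat × Nat) Int) (k : Nat × Nat) (total : Int) :
    (match dp.get? k with
      | some t => total + t
      | none => total) = total + dp.getD k 0 := by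
  rw [PySem.Dict.getD_eq_get?_getD]
  cases h : dp.get? k <;> simp

-- pull the conditional add out of a fold step
theorem if_add_push {c : Prop} [Decidable c] (a x : Int) :
    (if c then a + x else a) = a + (if c then x else 0) := by
  split <;> simp

-- hp as a sum (A's fold rewritten)
theorem hp_eq_sum {A : List (List Int)} {nn mask v : Nat} (hv : v ≠ 0)
    (h : mask.testBit v = true) :
    hp A nn mask v = ((List.range nn).map (fun u =>
      if (mask ^^^ (1 <<< v)).testBit u ∧ pvIdx A u v ≠ 0 then
        hp A nn (mask ^^^ (1 <<< v)) u else 0)).sum := by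
  rw [hp_eq_fold hv h]
  rw [PySem.List.foldl_congr_mem _ _
    (fun t u => t + (if (mask ^^^ (1 <<< v)).testBit u ∧ pvIdx A u v ≠ 0 then
      hp A nn (mask ^^^ (1 <<< v)) u else 0)) 0 (fun acc x _ => if_add_push _ _)]
  rw [PySem.List.foldl_add]
  simp

-- ===== B-side: bit-level helper lemmas =====

theorem testBit_one_shl (v i : Nat) : (1 <<< v).testBit i = decide (v = i) := by
  rw [Nat.shiftLeft_eq, one_mul, Nat.testBit_two_pow]

theorem eq_zero_iff_testBit (x : Nat) : x = 0 ↔ ∀ i, x.testBit i = false := by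
  constructor
  · rintro rfl i; exact Nat.zero_testBit i
  · intro h; exact Nat.eq_of_testBit_eq (fun i => by rw [h i, Nat.zero_testBit])

theorem and_eq_zero_iff (x y : Nat) :
    x &&& y = 0 ↔ ∀ i, ¬(x.testBit i = true ∧ y.testBit i = true) := by
  rw [eq_zero_iff_testBit]
  constructor
  · intro h i hc
    have := h i
    rw [Nat.testBit_and, hc.1, hc.2] at this
    simp at this
  · intro h i
    rw [Nat.testBit_and]
    cases hx : x.testBit i <;> cases hy : y.testBit i <;> simp_all

theorem or_pow_eq_of_testBit {a : Nat} (v : Nat) (h : a.testBit v = true) :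
    a ||| (1 <<< v) = a := by
  apply Nat.eq_of_testBit_eq
  intro i
  rw [Nat.testBit_or, testBit_one_shl]
  by_cases hiv : v = i
  · subst hiv; simp [h]
  · simp [hiv]

theorem or_pow_eq_xor_of_not {a : Nat} (v : Nat) (h : a.testBit v = false) :
    a ||| (1 <<< v) = a ^^^ (1 <<< v) := by
  apply Nat.eq_of_testBit_eq
  intro i
  rw [Nat.testBit_or, Nat.testBit_xor, testBit_one_shl]
  by_cases hiv : v = i
  · subst hiv; simp [h]
  · simp [hiv]

theorem popcount_or_pow (a v : Nat) :
    popcount (a ||| (1 <<< v)) = if a.testBit v then popcount a else popcount a + 1 := by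
  by_cases h : a.testBit v
  · rw [if_pos h, or_pow_eq_of_testBit v h]
  · rw [if_neg h, or_pow_eq_xor_of_not v (by simpa using h)]
    have hb : (a ^^^ (1 <<< v)).testBit v = true := by
      rw [testBit_xor_pow_self]
      simp [h]
    have := popcount_xor_pow v hb
    have he : (a ^^^ (1 <<< v)) ^^^ (1 <<< v) = a := by
      rw [Nat.xor_assoc, Nat.xor_self, Nat.xor_zero]
    rw [he] at this
    omega

-- ===== B-side: vertex-set masks of walks =====

def toMask (l : List Nat) : Nat := l.foldl (fun m x => m ||| (1 <<< x)) 0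

theorem toMask_aux_testBit :
    ∀ (l : List Nat) (init i : Nat),
      (l.foldl (fun m x => m ||| (1 <<< x)) init).testBit i
        = (init.testBit i || decide (i ∈ l)) := by
  intro l
  induction l with
  | nil => intro init i; simp
  | cons x l ih =>
    intro init i
    simp only [List.foldl_cons]
    rw [ih]
    rw [Nat.testBit_or, testBit_one_shl]
    by_cases hx : x = i <;> simp [hx, List.mem_cons, eq_comm]

theorem toMask_testBit (l : List Nat) (i : Nat) :
    (toMask l).testBit i = decide (i ∈ l) := by
  rw [toMask, toMask_aux_testBit]
  simp

theorem toMask_append (l : List Nat) (v : Nat) :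
    toMask (l ++ [v]) = toMask l ||| (1 <<< v) := by
  simp [toMask, List.foldl_append]

theorem popcount_toMask_le :
    ∀ (l : List Nat) (init : Nat),
      popcount (l.foldl (fun m x => m ||| (1 <<< x)) init) ≤ popcount init + l.length := by
  intro l
  induction l with
  | nil => intro init; simp
  | cons x l ih =>
    intro init
    simp only [List.foldl_cons, List.length_cons]
    have h1 := ih (init ||| (1 <<< x))
    have h2 := popcount_or_pow init x
    split at h2 <;> omega

theorem pc_toMask_le (l : List Nat) : popcount (toMask l) ≤ l.length := by
  have := popcount_toMask_le l 0
  rw [popcount_zero] at this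
  simpa [toMask] using this

theorem toMask_lt {l : List Nat} {nn : Nat} (h : ∀ x ∈ l, x < nn) : toMask l < 2 ^ nn := by
  apply Nat.lt_pow_two_of_testBit
  intro i hi
  rw [toMask_testBit]
  simp only [decide_eq_false_iff_not]
  intro hmem
  exact absurd (h i hmem) (by omega)

-- ===== B-side: walks and walk counts =====

-- all edge-valid vertex sequences 0 = w₀, …, w_k = v (vertices drawn from range nn, no self-loops)
def walkTo (A : List (List Int)) (nn : Nat) : Nat → Nat → List (List Nat)
  | 0, v => if v = 0 then [[0]] else []
  | k+1, v => (List.range nn).flatMap (fun u =>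
      if u ≠ v ∧ pvIdx A u v ≠ 0 then (walkTo A nn k u).map (fun l => l ++ [v]) else [])

theorem walk_facts {A : List (List Int)} {nn : Nat} (hnn : 0 < nn) :
    ∀ (k v : Nat) (l : List Nat), v < nn → l ∈ walkTo A nn k v →
      l.length = k + 1 ∧ (∀ x ∈ l, x < nn) ∧ (toMask l).testBit 0 = true ∧
      (toMask l).testBit v = true := by
  intro k
  induction k with
  | zero =>
    intro v l hv hl
    rw [walkTo] at hl
    by_cases hv0 : v = 0
    · subst hv0
      rw [if_pos rfl] at hl
      simp only [List.mem_singleton] at hl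
      subst hl
      refine ⟨rfl, ?_, ?_, ?_⟩
      · intro x hx; simp at hx; omega
      · rw [toMask_testBit]; simp
      · rw [toMask_testBit]; simp
    · rw [if_neg hv0] at hl
      simp at hl
  | succ k ih =>
    intro v l hv hl
    rw [walkTo] at hl
    rw [List.mem_flatMap] at hl
    obtain ⟨u, hu, hl⟩ := hl
    have hun : u < nn := List.mem_range.mp hu
    by_cases hc : u ≠ v ∧ pvIdx A u v ≠ 0
    · rw [if_pos hc, List.mem_map] at hl
      obtain ⟨l', hl', rfl⟩ := hl
      obtain ⟨hlen, helem, hb0, _⟩ := ih u l' hun hl'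
      refine ⟨by simp [hlen], ?_, ?_, ?_⟩
      · intro x hx
        rcases List.mem_append.mp hx with hx | hx
        · exact helem x hx
        · simp at hx; omega
      · rw [toMask_append, Nat.testBit_or, hb0]; simp
      · rw [toMask_append, Nat.testBit_or, testBit_one_shl]; simp
    · rw [if_neg hc] at hl
      simp at hl

-- pushing a sum through flatMap
theorem sum_map_flatMap {α β : Type} (L : List α) (g : α → List β) (f : β → Int) :
    ((L.flatMap g).map f).sum = (L.map (fun a => ((g a).map f).sum)).sum := by
  induction L with
  | nil => simp
  | cons a L ih => simp [List.flatMap_cons, ih]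

theorem sum_map_neg_int {α : Type} (L : List α) (f : α → Int) :
    (L.map (fun x => -f x)).sum = -(L.map f).sum := by
  induction L with
  | nil => simp
  | cons a L ih => simp [ih]; ring

-- walk counts with an excluded vertex set, as B's iteration computes them
def W (A : List (List Int)) (nn excl : Nat) : Nat → Nat → Int
  | 0, v => if v = 0 then 1 else 0
  | k+1, v => if excl.testBit v then 0
      else ((List.range nn).map (fun u =>
        if u ≠ v ∧ ¬ excl.testBit u ∧ pvIdx A u v ≠ 0 then W A nn excl k u else 0)).sum

theorem getD_map_range (f : Nat → Int) {v nn : Nat} (hv : v < nn) :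
    ((List.range nn).map f).getD v 0 = f v := by
  rw [List.getD_eq_getElem?_getD, List.getElem?_map, List.getElem?_range hv]
  rfl

-- B's vector iteration computes W
theorem bIter_eq_W (A : List (List Int)) (nn excl : Nat) :
    ∀ (k v : Nat), v < nn →
      (((List.range k).foldl (fun vec _ => bStep A nn excl vec)
        ((List.range nn).map (fun v => if v = 0 then 1 else 0)))).getD v 0 = W A nn excl k v := by
  intro k
  induction k with
  | zero =>
    intro v hv
    simp only [List.range_zero, List.foldl_nil]
    rw [getD_map_range _ hv]
    rfl
  | succ k ih =>
    intro v hv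
    rw [List.range_succ, List.foldl_append]
    simp only [List.foldl_cons, List.foldl_nil]
    rw [bStep, getD_map_range _ hv]
    rw [W]
    by_cases he : excl.testBit v
    · rw [if_pos he, if_pos he]
    · rw [if_neg he, if_neg he]
      rw [PySem.List.foldl_congr_mem _ _
        (fun s u => s + (if u ≠ v ∧ ¬ excl.testBit u ∧ pvIdx A u v ≠ 0 then
          W A nn excl k u else 0)) 0 ?_]
      · rw [PySem.List.foldl_add]; simp
      · intro acc x hx
        rw [ih x (List.mem_range.mp hx)]
        exact if_add_push _ _

theorem one_and_eq_zero {excl : Nat} (h0 : excl.testBit 0 = false) : 1 &&& excl = 0 := by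
  rw [and_eq_zero_iff]
  intro i hc
  have h1 : (1 : Nat).testBit i = decide (0 = i) := testBit_one_shl 0 i
  rw [h1] at hc
  have : (0 : Nat) = i := of_decide_eq_true hc.1
  subst this
  rw [h0] at hc
  exact absurd hc.2 (by simp)

theorem or_pow_and_eq_zero {excl : Nat} (t v : Nat) (he : excl.testBit v = false) :
    ((t ||| (1 <<< v)) &&& excl = 0) ↔ (t &&& excl = 0) := by
  rw [and_eq_zero_iff, and_eq_zero_iff]
  constructor
  · intro h i hc
    refine h i ⟨?_, hc.2⟩
    rw [Nat.testBit_or, hc.1]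
    simp
  · intro h i hc
    have h1 := hc.1
    rw [Nat.testBit_or, testBit_one_shl] at h1
    by_cases hiv : v = i
    · subst hiv
      rw [he] at hc
      exact absurd hc.2 (by simp)
    · rw [decide_eq_false hiv] at h1
      simp at h1
      exact h i ⟨h1, hc.2⟩

theorem and_ne_zero_of_testBit {a b : Nat} (i : Nat) (ha : a.testBit i = true)
    (hb : b.testBit i = true) : a &&& b ≠ 0 := by
  intro hand
  rw [and_eq_zero_iff] at hand
  exact hand i ⟨ha, hb⟩

-- W counts the walks avoiding excl
theorem W_eq_walkSum {A : List (List Int)} {nn excl : Nat}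
    (h0 : excl.testBit 0 = false) (hnn : 0 < nn) :
    ∀ (k v : Nat), v < nn →
      W A nn excl k v
        = ((walkTo A nn k v).map (fun l => if toMask l &&& excl = 0 then (1:Int) else 0)).sum := by
  intro k
  induction k with
  | zero =>
    intro v hv
    rw [W, walkTo]
    by_cases hv0 : v = 0
    · subst hv0
      rw [if_pos rfl, if_pos rfl]
      simp only [List.map_cons, List.map_nil, List.sum_cons, List.sum_nil]
      have ht : toMask [0] = 1 := by simp [toMask]
      rw [ht, if_pos (one_and_eq_zero h0)]
      norm_num
    · rw [if_neg hv0, if_neg hv0]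
      simp
  | succ k ih =>
    intro v hv
    rw [W, walkTo, sum_map_flatMap]
    by_cases he : excl.testBit v
    · rw [if_pos he]
      symm
      apply List.sum_eq_zero
      intro x hx
      rw [List.mem_map] at hx
      obtain ⟨u, hu, rfl⟩ := hx
      by_cases hg : u ≠ v ∧ pvIdx A u v ≠ 0
      · rw [if_pos hg, List.map_map]
        apply List.sum_eq_zero
        intro y hy
        rw [List.mem_map] at hy
        obtain ⟨l, hl, rfl⟩ := hy
        simp only [Function.comp_apply]
        rw [toMask_append]
        exact if_neg (and_ne_zero_of_testBit v
          (by rw [Nat.testBit_or, testBit_one_shl]; simp) he)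
      · rw [if_neg hg]
        simp
    · rw [if_neg he]
      apply congrArg List.sum
      apply List.map_congr_left
      intro u hu
      have hun : u < nn := List.mem_range.mp hu
      by_cases hg : u ≠ v ∧ pvIdx A u v ≠ 0
      · rw [if_pos hg, List.map_map]
        by_cases heu : excl.testBit u
        · rw [if_neg (by simp [heu])]
          symm
          apply List.sum_eq_zero
          intro y hy
          rw [List.mem_map] at hy
          obtain ⟨l, hl, rfl⟩ := hy
          simp only [Function.comp_apply]
          rw [toMask_append]
          refine if_neg (and_ne_zero_of_testBit u ?_ heu)
          rw [Nat.testBit_or, (walk_facts hnn k u l hun hl).2.2.2]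
          simp
        · rw [if_pos ⟨hg.1, by simp [heu], hg.2⟩, ih u hun]
          apply congrArg List.sum
          apply List.map_congr_left
          intro l hl
          simp only [Function.comp_apply]
          rw [toMask_append]
          exact (if_congr (or_pow_and_eq_zero (toMask l) v (by simpa using he)) rfl rfl).symm
      · rw [if_neg (fun hc => hg ⟨hc.1, hc.2.2⟩), if_neg hg]
        simp

theorem or_pow_eq_iff {t mask v k : Nat} (hmv : mask.testBit v = true)
    (hlen : popcount t ≤ k + 1) (hpc : popcount mask = k + 2) :
    (t ||| (1 <<< v) = mask) ↔ (t = mask ^^^ (1 <<< v)) := by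
  by_cases hbv : t.testBit v
  · constructor
    · intro h
      rw [or_pow_eq_of_testBit v hbv] at h
      rw [h] at hlen
      omega
    · intro h
      exfalso
      rw [h, testBit_xor_pow_self, hmv] at hbv
      simp at hbv
  · rw [or_pow_eq_xor_of_not v (by simpa using hbv)]
    constructor
    · intro h
      rw [← h, Nat.xor_assoc, Nat.xor_self, Nat.xor_zero]
    · intro h
      rw [h, Nat.xor_assoc, Nat.xor_self, Nat.xor_zero]

-- the number of walks with exactly the vertex set `mask` is A's DP value hp
theorem walk_count_hp {A : List (List Int)} {nn : Nat} (hnn : 0 < nn) :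
    ∀ (k mask v : Nat), v < nn → popcount mask = k + 1 → mask.testBit 0 = true →
      ((walkTo A nn k v).map (fun l => if toMask l = mask then (1:Int) else 0)).sum
        = hp A nn mask v := by
  intro k
  induction k with
  | zero =>
    intro mask v hv hpc hb0
    have hm1 : mask = 1 := eq_one_of_popcount_le_one hb0 (by omega)
    subst hm1
    rw [walkTo]
    by_cases hv0 : v = 0
    · subst hv0
      rw [if_pos rfl]
      simp only [List.map_cons, List.map_nil, List.sum_cons, List.sum_nil]
      have ht : toMask [0] = 1 := by simp [toMask]
      rw [ht, if_pos rfl, hp_one_zero]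
      norm_num
    · rw [if_neg hv0]
      have : hp A nn 1 v = 0 := hp_zero_of_not_testBit (by
        have : (1 : Nat) = 2 ^ 0 := rfl
        rw [this, Nat.testBit_two_pow]
        simp [Ne.symm hv0])
      rw [this]
      simp
  | succ k ih =>
    intro mask v hv hpc hb0
    rw [walkTo, sum_map_flatMap]
    by_cases hmv : mask.testBit v
    · by_cases hv0 : v = 0
      · subst hv0
        have hm1 : mask ≠ 1 := by
          intro h; rw [h, popcount_one] at hpc; omega
        rw [hp_at_zero, if_neg hm1]
        apply List.sum_eq_zero
        intro x hx
        rw [List.mem_map] at hx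
        obtain ⟨u, hu, rfl⟩ := hx
        have hun : u < nn := List.mem_range.mp hu
        by_cases hg : u ≠ 0 ∧ pvIdx A u 0 ≠ 0
        · rw [if_pos hg, List.map_map]
          apply List.sum_eq_zero
          intro y hy
          rw [List.mem_map] at hy
          obtain ⟨l, hl, rfl⟩ := hy
          obtain ⟨hlen, _, hlb0, _⟩ := walk_facts hnn k u l hun hl
          simp only [Function.comp_apply]
          rw [toMask_append, or_pow_eq_of_testBit 0 hlb0]
          refine if_neg ?_
          intro h
          have := pc_toMask_le l
          rw [h, hlen] at this
          omega
        · rw [if_neg hg]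
          simp
      · have hpm : popcount (mask ^^^ (1 <<< v)) = k + 1 := by
          have := popcount_xor_pow v hmv
          omega
        have hpmb0 : (mask ^^^ (1 <<< v)).testBit 0 = true := by
          rw [testBit_xor_pow_ne _ _ _ (Ne.symm hv0)]
          exact hb0
        rw [hp_eq_sum hv0 hmv]
        apply congrArg List.sum
        apply List.map_congr_left
        intro u hu
        have hun : u < nn := List.mem_range.mp hu
        by_cases hg : u ≠ v ∧ pvIdx A u v ≠ 0
        · rw [if_pos hg, List.map_map]
          have hmape : ((walkTo A nn k u).map ((fun l => if toMask l = mask then (1:Int) else 0)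
                ∘ (fun l => l ++ [v])))
              = (walkTo A nn k u).map (fun l =>
                  if toMask l = mask ^^^ (1 <<< v) then (1:Int) else 0) := by
            apply List.map_congr_left
            intro l hl
            obtain ⟨hlen, _, _, _⟩ := walk_facts hnn k u l hun hl
            simp only [Function.comp_apply]
            rw [toMask_append]
            refine if_congr (or_pow_eq_iff hmv ?_ hpc) rfl rfl
            have := pc_toMask_le l
            omega
          rw [hmape, ih (mask ^^^ (1 <<< v)) u hun hpm hpmb0]
          by_cases hbu : (mask ^^^ (1 <<< v)).testBit u
          · rw [if_pos ⟨hbu, hg.2⟩]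
          · rw [if_neg (by simp [hbu]), hp_zero_of_not_testBit (by simpa using hbu)]
        · rw [if_neg hg]
          by_cases hedge : pvIdx A u v ≠ 0
          · have huv : u = v := by
              by_contra h
              exact hg ⟨h, hedge⟩
            subst huv
            rw [if_neg (by rw [testBit_xor_pow_self, hmv]; simp)]
            simp
          · rw [if_neg (by simp [hedge])]
            simp
    · have h0 : hp A nn mask v = 0 := hp_zero_of_not_testBit (by simpa using hmv)
      rw [h0]
      apply List.sum_eq_zero
      intro x hx
      rw [List.mem_map] at hx
      obtain ⟨u, hu, rfl⟩ := hx
      by_cases hg : u ≠ v ∧ pvIdx A u v ≠ 0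
      · rw [if_pos hg, List.map_map]
        apply List.sum_eq_zero
        intro y hy
        rw [List.mem_map] at hy
        obtain ⟨l, hl, rfl⟩ := hy
        simp only [Function.comp_apply]
        rw [toMask_append]
        refine if_neg ?_
        intro h
        rw [← h, Nat.testBit_or, testBit_one_shl] at hmv
        simp at hmv
      · rw [if_neg hg]
        simp

-- ===== B-side: inclusion-exclusion machinery =====

theorem two_mul_or (x y b : Nat) (hb : b < 2) :
    (2 * x) ||| (2 * y + b) = 2 * (x ||| y) + b := by
  apply Nat.eq_of_testBit_eq
  intro i
  cases i with
  | zero =>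
    rw [Nat.testBit_or]
    rw [Nat.testBit_zero, Nat.testBit_zero, Nat.testBit_zero]
    have h1 : (2 * x) % 2 = 0 := by omega
    have h2 : (2 * y + b) % 2 = b := by omega
    have h3 : (2 * (x ||| y) + b) % 2 = b := by omega
    rw [h1, h2, h3]
    simp
  | succ i =>
    rw [Nat.testBit_or]
    rw [Nat.testBit_add_one, Nat.testBit_add_one, Nat.testBit_add_one]
    have h1 : (2 * x) / 2 = x := by omega
    have h2 : (2 * y + b) / 2 = y := by omega
    have h3 : (2 * (x ||| y) + b) / 2 = x ||| y := by omega
    rw [h1, h2, h3, Nat.testBit_or]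

theorem two_pow_add_eq_or : ∀ (m s : Nat), s < 2 ^ m → 2 ^ m + s = 2 ^ m ||| s := by
  intro m
  induction m with
  | zero =>
    intro s hs
    interval_cases s
    simp
  | succ m ih =>
    intro s hs
    have hpow : (2:Nat) ^ (m + 1) = 2 * 2 ^ m := by ring
    have hs2 : s / 2 < 2 ^ m := by omega
    have hdm : s = 2 * (s / 2) + s % 2 := by omega
    have h1 : 2 ^ (m + 1) ||| s = 2 * (2 ^ m ||| s / 2) + s % 2 := by
      conv_lhs => rw [hpow, hdm]
      exact two_mul_or (2 ^ m) (s / 2) (s % 2) (by omega)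
    rw [h1, ← ih (s / 2) hs2]
    omega

theorem popcount_two_pow_add : ∀ (m s : Nat), s < 2 ^ m → popcount (2 ^ m + s) = popcount s + 1 := by
  intro m
  induction m with
  | zero =>
    intro s hs
    interval_cases s
    show popcount (2 ^ 0 + 0) = popcount 0 + 1
    norm_num [popcount_one, popcount_zero]
  | succ m ih =>
    intro s hs
    have hpow : (2:Nat) ^ (m + 1) = 2 * 2 ^ m := by ring
    have hs2 : s / 2 < 2 ^ m := by omega
    rw [popcount_rec (2 ^ (m + 1) + s), popcount_rec s]
    have h1 : (2 ^ (m + 1) + s) % 2 = s % 2 := by omega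
    have h2 : (2 ^ (m + 1) + s) / 2 = 2 ^ m + s / 2 := by omega
    rw [h1, h2, ih (s / 2) hs2]
    omega

theorem or_eq_zero_iff_nat (a b : Nat) : a ||| b = 0 ↔ a = 0 ∧ b = 0 := by
  rw [eq_zero_iff_testBit, eq_zero_iff_testBit, eq_zero_iff_testBit]
  constructor
  · intro h
    refine ⟨fun i => ?_, fun i => ?_⟩ <;>
      · have := h i
        rw [Nat.testBit_or] at this
        cases ha : a.testBit i <;> cases hb : b.testBit i <;> simp_all
  · intro h i
    rw [Nat.testBit_or, h.1 i, h.2 i]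
    rfl

theorem two_pow_and_eq_zero_iff (m M : Nat) : 2 ^ m &&& M = 0 ↔ M.testBit m = false := by
  rw [and_eq_zero_iff]
  constructor
  · intro h
    by_contra hb
    exact h m ⟨by rw [Nat.testBit_two_pow]; simp, by simpa using hb⟩
  · intro h i hc
    have h1 := hc.1
    rw [Nat.testBit_two_pow] at h1
    have : m = i := of_decide_eq_true h1
    subst this
    rw [h] at hc
    exact absurd hc.2 (by simp)

theorem IE_core (M : Nat) : ∀ (m : Nat),
    (((List.range (2 ^ m)).map (fun s =>
      (-1:Int) ^ (popcount s) * (if s &&& M = 0 then (1:Int) else 0))).sum)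
      = if ∀ i, i < m → M.testBit i = true then 1 else 0 := by
  intro m
  induction m with
  | zero =>
    simp only [pow_zero, List.range_one, List.map_cons, List.map_nil, List.sum_cons,
      List.sum_nil]
    rw [popcount_zero, if_pos (by rw [Nat.zero_and]), if_pos (by intro i hi; omega)]
    norm_num
  | succ m ih =>
    have hsplit : (2:Nat) ^ (m + 1) = 2 ^ m + 2 ^ m := by ring
    rw [hsplit, List.range_add, List.map_append, List.sum_append, List.map_map]
    have h2 : ((List.range (2 ^ m)).map ((fun s => (-1:Int) ^ (popcount s) *
          (if s &&& M = 0 then (1:Int) else 0)) ∘ (fun x => 2 ^ m + x))).sum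
        = ((List.range (2 ^ m)).map (fun s => (-1:Int) ^ (popcount s + 1) *
          (if s &&& M = 0 ∧ M.testBit m = false then (1:Int) else 0))).sum := by
      apply congrArg List.sum
      apply List.map_congr_left
      intro s hs
      have hsl : s < 2 ^ m := List.mem_range.mp hs
      simp only [Function.comp_apply]
      rw [popcount_two_pow_add m s hsl, two_pow_add_eq_or m s hsl]
      congr 1
      refine if_congr ?_ rfl rfl
      rw [Nat.and_or_distrib_right, or_eq_zero_iff_nat, two_pow_and_eq_zero_iff]
      exact and_comm
    rw [h2]
    by_cases hM : M.testBit m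
    · have hz : ((List.range (2 ^ m)).map (fun s => (-1:Int) ^ (popcount s + 1) *
          (if s &&& M = 0 ∧ M.testBit m = false then (1:Int) else 0))).sum = 0 := by
        apply List.sum_eq_zero
        intro x hx
        rw [List.mem_map] at hx
        obtain ⟨s, hs, rfl⟩ := hx
        rw [if_neg (by simp [hM])]
        ring
      rw [hz, add_zero, ih]
      refine if_congr ?_ rfl rfl
      constructor
      · intro h i hi
        by_cases him : i = m
        · subst him; exact hM
        · exact h i (by omega)
      · intro h i hi
        exact h i (by omega)
    · have hneg : ((List.range (2 ^ m)).map (fun s => (-1:Int) ^ (popcount s + 1) *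
          (if s &&& M = 0 ∧ M.testBit m = false then (1:Int) else 0))).sum
          = -(((List.range (2 ^ m)).map (fun s => (-1:Int) ^ (popcount s) *
          (if s &&& M = 0 then (1:Int) else 0))).sum) := by
        rw [← sum_map_neg_int]
        apply congrArg List.sum
        apply List.map_congr_left
        intro s hs
        rw [if_congr (show (s &&& M = 0 ∧ M.testBit m = false) ↔ s &&& M = 0 by
          simp [hM]) rfl rfl]
        rw [pow_succ]
        ring
      rw [hneg, add_neg_cancel]
      rw [if_neg (fun h => hM (h m (by omega)))]

theorem cond_shift (t s : Nat) : (t &&& (s <<< 1) = 0) ↔ (s &&& (t >>> 1) = 0) := by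
  rw [and_eq_zero_iff, and_eq_zero_iff]
  constructor
  · intro h j hc
    refine h (j + 1) ⟨?_, ?_⟩
    · have := hc.2
      rw [Nat.testBit_shiftRight, Nat.add_comm] at this
      simpa using this
    · rw [Nat.testBit_shiftLeft]
      simpa using hc.1
  · intro h i hc
    cases i with
    | zero =>
      have := hc.2
      rw [Nat.testBit_shiftLeft] at this
      simp at this
    | succ j =>
      refine h j ⟨?_, ?_⟩
      · have := hc.2
        rw [Nat.testBit_shiftLeft] at this
        simpa using this
      · rw [Nat.testBit_shiftRight, Nat.add_comm]
        simpa using hc.1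

theorem bits_full {t nn : Nat} (hlt : t < 2 ^ nn) (h0 : t.testBit 0 = true) :
    (∀ i, i < nn - 1 → (t >>> 1).testBit i = true) ↔ t = 2 ^ nn - 1 := by
  constructor
  · intro h
    apply Nat.eq_of_testBit_eq
    intro j
    rw [Nat.testBit_two_pow_sub_one]
    by_cases hj : j < nn
    · rw [decide_eq_true (by omega : j < nn)]
      cases j with
      | zero => exact h0
      | succ i =>
        have := h i (by omega)
        rw [Nat.testBit_shiftRight, Nat.add_comm] at this
        simpa using this
    · rw [decide_eq_false (by omega : ¬ j < nn)]
      exact Nat.testBit_lt_two_pow (by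
        calc t < 2 ^ nn := hlt
          _ ≤ 2 ^ j := Nat.pow_le_pow_right (by norm_num) (by omega))
  · intro h i hi
    subst h
    rw [Nat.testBit_shiftRight, Nat.testBit_two_pow_sub_one]
    simp
    omega

theorem sum_comm_list {α β : Type} (K : List α) (L : List β) (g : α → β → Int) :
    (K.map (fun a => (L.map (g a)).sum)).sum = (L.map (fun b => (K.map (fun a => g a b)).sum)).sum := by
  induction L with
  | nil => simp
  | cons b L ih =>
    simp only [List.map_cons, List.sum_cons]
    rw [PySem.List.sum_map_add_int, ih]

-- B's result as a sum of hp values over last vertices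
theorem alt_eq_hp_sum (A : List (List Int)) (n : Int) (hn : ¬ n < 3) :
    count_ham_cycles_alt A n = ((List.range n.toNat).map (fun u =>
      if u ≠ 0 ∧ pvIdx A u 0 ≠ 0 then hp A n.toNat (2 ^ n.toNat - 1) u else 0)).sum := by
  have hnn0 : 0 < n.toNat := by omega
  have e0 : count_ham_cycles_alt A n = (List.range (2 ^ (n.toNat - 1))).foldl (fun total sub =>
      total + (-1 : Int) ^ (popcount sub) *
        (((List.range n.toNat).foldl (fun vec _ => bStep A n.toNat (sub <<< 1) vec)
          ((List.range n.toNat).map (fun v => if v = 0 then 1 else 0)))).getD 0 0) 0 := by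
    unfold count_ham_cycles_alt
    rw [if_neg hn]
  rw [e0]
  rw [PySem.List.foldl_congr_mem _ _ (fun total sub =>
    total + ((-1:Int) ^ (popcount sub) * W A n.toNat (sub <<< 1) n.toNat 0)) 0
    (by intro acc x _; rw [bIter_eq_W A n.toNat (x <<< 1) n.toNat 0 hnn0])]
  rw [PySem.List.foldl_add]
  simp only [zero_add]
  have h0 : ∀ sub : Nat, (sub <<< 1).testBit 0 = false := fun sub => by
    rw [Nat.testBit_shiftLeft]
    simp
  rw [List.map_congr_left (l := List.range (2 ^ (n.toNat - 1)))
    (g := fun sub => ((walkTo A n.toNat n.toNat 0).map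
      (fun l => (-1:Int) ^ (popcount sub) *
        (if toMask l &&& (sub <<< 1) = 0 then (1:Int) else 0))).sum)
    (by intro sub _
        rw [W_eq_walkSum (h0 sub) hnn0 n.toNat 0 hnn0]
        exact (List.sum_map_mul_left _ _ _).symm)]
  rw [sum_comm_list]
  have hper : ∀ l ∈ walkTo A n.toNat n.toNat 0,
      ((List.range (2 ^ (n.toNat - 1))).map (fun sub =>
        (-1:Int) ^ (popcount sub) * (if toMask l &&& (sub <<< 1) = 0 then (1:Int) else 0))).sum
      = if toMask l = 2 ^ n.toNat - 1 then (1:Int) else 0 := by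
    intro l hl
    obtain ⟨hlen, helem, hlb0, _⟩ := walk_facts hnn0 n.toNat 0 l hnn0 hl
    have hlt : toMask l < 2 ^ n.toNat := toMask_lt helem
    have hcongr : ((List.range (2 ^ (n.toNat - 1))).map (fun sub =>
        (-1:Int) ^ (popcount sub) * (if toMask l &&& (sub <<< 1) = 0 then (1:Int) else 0)))
        = ((List.range (2 ^ (n.toNat - 1))).map (fun sub =>
        (-1:Int) ^ (popcount sub) * (if sub &&& (toMask l >>> 1) = 0 then (1:Int) else 0))) := by
      apply List.map_congr_left
      intro sub _
      rw [if_congr (cond_shift (toMask l) sub) rfl rfl]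
    rw [hcongr, IE_core (toMask l >>> 1) (n.toNat - 1)]
    exact if_congr (bits_full hlt hlb0) rfl rfl
  rw [List.map_congr_left hper]
  obtain ⟨m, hm⟩ : ∃ m, n.toNat = m + 1 := ⟨n.toNat - 1, by omega⟩
  rw [hm]
  rw [walkTo, sum_map_flatMap]
  apply congrArg List.sum
  apply List.map_congr_left
  intro u hu
  have hun : u < m + 1 := List.mem_range.mp hu
  by_cases hg : u ≠ 0 ∧ pvIdx A u 0 ≠ 0
  · rw [if_pos hg, if_pos hg, List.map_map]
    have hmape : ((walkTo A (m + 1) m u).map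
          ((fun l => if toMask l = 2 ^ (m + 1) - 1 then (1:Int) else 0) ∘ (fun l => l ++ [0])))
        = (walkTo A (m + 1) m u).map
          (fun l => if toMask l = 2 ^ (m + 1) - 1 then (1:Int) else 0) := by
      apply List.map_congr_left
      intro l hl
      obtain ⟨_, _, hb0', _⟩ := walk_facts (by omega : 0 < m + 1) m u l hun hl
      simp only [Function.comp_apply]
      rw [toMask_append, or_pow_eq_of_testBit 0 hb0']
    rw [hmape]
    exact walk_count_hp (by omega) m (2 ^ (m + 1) - 1) u hun
      (by rw [popcount_two_pow_sub_one])
      (by rw [Nat.testBit_two_pow_sub_one]; simp)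
  · rw [if_neg hg, if_neg hg]
    simp

-- ===== VERDICT proof body =====
theorem count_ham_cycles_spec : Claim_equal_count_ham_cycles := by
  intro A n _ _
  unfold Spec_count_ham_cycles
  by_cases hn : n < 3
  · simp [count_ham_cycles, count_ham_cycles_alt, hn]
  · have h3 : 3 ≤ n.toNat := by omega
    have hfull : 2 ^ n.toNat - 1 < 2 ^ n.toNat := Nat.sub_lt (Nat.two_pow_pos _) one_pos
    -- A's dict satisfies the invariant at level n
    have hA := msfoldA (A := A) (nn := n.toNat) (n.toNat - 1) 1
      ((PySem.Dict.empty).insert ((1 : Nat), (0 : Nat)) (1 : Int)) (le_refl 1) (by omega)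
      (invA_init A n.toNat)
    have e1 : 1 + (n.toNat - 1) = n.toNat := by omega
    have e2 : (1 + 1 : Nat) = 2 := rfl
    rw [e1, e2] at hA
    -- A's result
    have eA : count_ham_cycles A n = (List.range' 1 (n.toNat - 1)).foldl
        (fun total v => if pvIdx A v 0 ≠ 0 then
          total + hp A n.toNat (2 ^ n.toNat - 1) v else total) 0 := by
      have e0 : count_ham_cycles A n = (List.range' 1 (n.toNat - 1)).foldl
          (fun total v => if pvIdx A v 0 ≠ 0 then
            match (((List.range' 2 (n.toNat - 1)).foldl (fun dp ms =>
      (List.range (2 ^ n.toNat)).foldl (fun dp mask =>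
        if popcount mask ≠ ms then dp
        else if ¬ mask.testBit 0 then dp
        else (List.range n.toNat).foldl (fun dp v =>
          if ¬ mask.testBit v then dp
          else if v = 0 ∧ ms < n.toNat then dp
          else
            let pm := mask ^^^ (1 <<< v)
            if ¬ pm.testBit 0 then dp
            else
              let t : Int := (List.range n.toNat).foldl (fun t u =>
                if pm.testBit u ∧ pvIdx A u v ≠ 0 then t + dp.getD (pm, u) 0 else t) 0
              if t ≠ 0 then dp.insert (mask, v) t else dp) dp) dp)
      ((PySem.Dict.empty).insert (1, 0) 1))).get? (2 ^ n.toNat - 1, v) with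
            | some t => total + t
            | none => total
          else total) 0 := by
        unfold count_ham_cycles
        rw [if_neg hn]
      rw [e0]
      apply PySem.List.foldl_congr_mem
      intro total v _
      by_cases hidx : pvIdx A v 0 ≠ 0
      · rw [if_pos hidx, if_pos hidx, match_get?_eq]
        rw [hA (2 ^ n.toNat - 1) v hfull]
        rw [if_pos (by rw [popcount_two_pow_sub_one])]
      · rw [if_neg hidx, if_neg hidx]
    -- A's fold as a sum over range' 1 (nn-1)
    have eA2 : count_ham_cycles A n = ((List.range' 1 (n.toNat - 1)).map (fun v =>
        if pvIdx A v 0 ≠ 0 then hp A n.toNat (2 ^ n.toNat - 1) v else 0)).sum := by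
      rw [eA]
      rw [PySem.List.foldl_congr_mem _ _
        (fun total v => total + (if pvIdx A v 0 ≠ 0 then
          hp A n.toNat (2 ^ n.toNat - 1) v else 0)) 0 (fun acc x _ => if_add_push _ _)]
      rw [PySem.List.foldl_add]
      simp
    -- B's result as a sum over range nn, then drop the u = 0 term
    rw [alt_eq_hp_sum A n hn, eA2]
    have hsplit : List.range n.toNat = 0 :: List.range' 1 (n.toNat - 1) := by
      rw [List.range_eq_range']
      obtain ⟨m, hm⟩ : ∃ m, n.toNat = m + 1 := ⟨n.toNat - 1, by omega⟩
      rw [hm, List.range'_succ]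
      simp
    rw [hsplit]
    simp only [List.map_cons, List.sum_cons]
    have hz : (if (0:Nat) ≠ 0 ∧ pvIdx A 0 0 ≠ 0 then hp A n.toNat (2 ^ n.toNat - 1) 0 else 0) = 0 := by
      simp
    rw [hz, zero_add]
    apply congrArg List.sum
    apply List.map_congr_left
    intro v hv
    have h1 : 1 ≤ v := (List.mem_range'_1.mp hv).1
    have hvne : v ≠ 0 := by omega
    simp [hvne]
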